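-- pv_equiv track=rewrite | github.com/jitenkr2030/Brain-AI-Framework | examples/legal-research/app.py | _classify_argument_type
-- ===== SOURCE A (Python) =====
-- def _classify_argument_type(sentence: str) -> str:
--     """Classify type of legal argument"""
--     sentence_lower = sentence.lower()
--
--     if any(word in sentence_lower for word in ["precedent", "prior case", "established law"]):
--         return "precedential"
--     elif any(word in sentence_lower for word in ["statute", "statutory", "legislative"]):
--         return "statutory"
--     elif any(word in sentence_lower for word in ["constitutional", "amendment", "rights"]):
--         return "constitutional"
--     elif any(word in sentence_lower for word in ["policy", "public interest", "social"]):
--         return "policy"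
--     else:
--         return "general"
-- ===== SOURCE B (Python) =====
-- KEYWORDS = [
--     ("precedent", 0), ("prior case", 0), ("established law", 0),
--     ("statute", 1), ("statutory", 1), ("legislative", 1),
--     ("constitutional", 2), ("amendment", 2), ("rights", 2),
--     ("policy", 3), ("public interest", 3), ("social", 3),
-- ]
-- LABELS = ["precedential", "statutory", "constitutional", "policy", "general"]
--
--
-- def _classify_argument_type(sentence: str) -> str:
--     """Single left-to-right scan over the sentence: at each position test which
--     keywords start there and keep the minimum priority matched; the label is
--     picked from that priority."""
--     s = sentence.lower()
--     best = 4
--     for i in range(len(s)):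
--         for kw, p in KEYWORDS:
--             if p < best and s.startswith(kw, i):
--                 best = p
--     return LABELS[best]
-- ===== Notes on version B (the rewrite author's own statement) =====
-- stated objective: alternative
-- what changed: Instead of an if/elif chain doing a per-category substring search, B scans the lowercased sentence once position by position, tests which keywords start at each index, keeps the minimum priority matched, and picks the label arithmetically from that priority.
import Mathlib
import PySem

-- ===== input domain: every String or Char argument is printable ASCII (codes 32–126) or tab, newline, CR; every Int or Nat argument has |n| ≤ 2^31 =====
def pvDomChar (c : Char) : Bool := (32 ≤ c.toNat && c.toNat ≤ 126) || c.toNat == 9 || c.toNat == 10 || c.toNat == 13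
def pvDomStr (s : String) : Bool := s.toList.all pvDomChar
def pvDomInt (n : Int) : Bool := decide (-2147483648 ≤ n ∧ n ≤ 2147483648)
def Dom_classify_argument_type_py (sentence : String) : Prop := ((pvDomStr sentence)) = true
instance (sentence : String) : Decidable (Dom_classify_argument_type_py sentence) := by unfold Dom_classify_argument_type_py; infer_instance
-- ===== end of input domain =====

-- B replaces A's per-category if/elif substring searches by a single positional scan of the
-- sentence that keeps the minimum matched keyword priority (alternative algorithm; not claimed faster).

-- ===== PORT A =====
def classify_argument_type_py (sentence : String) : String :=
  let sentence_lower := PySem.Str.lower sentence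
  if ["precedent", "prior case", "established law"].any (fun word => PySem.Str.isIn word sentence_lower) then
    "precedential"
  else if ["statute", "statutory", "legislative"].any (fun word => PySem.Str.isIn word sentence_lower) then
    "statutory"
  else if ["constitutional", "amendment", "rights"].any (fun word => PySem.Str.isIn word sentence_lower) then
    "constitutional"
  else if ["policy", "public interest", "social"].any (fun word => PySem.Str.isIn word sentence_lower) then
    "policy"
  else
    "general"

-- ===== PORT B =====
def pvKeywords : List (List Char × Nat) :=
  [("precedent".toList, 0), ("prior case".toList, 0), ("established law".toList, 0),
   ("statute".toList, 1), ("statutory".toList, 1), ("legislative".toList, 1),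
   ("constitutional".toList, 2), ("amendment".toList, 2), ("rights".toList, 2),
   ("policy".toList, 3), ("public interest".toList, 3), ("social".toList, 3)]

def pvLabels : List String := ["precedential", "statutory", "constitutional", "policy", "general"]

def classify_argument_type_py_alt (sentence : String) : String :=
  let s := PySem.Chars.lower sentence.toList
  let best := (List.range s.length).foldl
    (fun best i => pvKeywords.foldl
      (fun b kp => if kp.2 < b ∧ PySem.Chars.startswith (s.drop i) kp.1 = true then kp.2 else b)
      best) 4
  pvLabels.getD best "general"

-- ===== PRECONDITION & SPEC =====
def Spec_classify_argument_type_py (sentence : String) (out : String) : Prop := out = classify_argument_type_py_alt sentence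
instance (sentence : String) (out : String) : Decidable (Spec_classify_argument_type_py sentence out) := by unfold Spec_classify_argument_type_py; infer_instance

-- ===== CLAIM (what is proved, stated in full; the proofs are below) =====
def Claim_equal_classify_argument_type_py : Prop := ∀ (sentence : String), Dom_classify_argument_type_py sentence → Spec_classify_argument_type_py sentence (classify_argument_type_py sentence)

-- ===== LEMMAS AND PROOFS =====

-- the guarded update 'if p < b and match then p else b' is the min-update 'if match then min b p else b'
theorem pv_guard_min (L : List (List Char × Nat)) (M : List Char → Bool) (b : Nat) :
    L.foldl (fun b kp => if kp.2 < b ∧ M kp.1 = true then kp.2 else b) b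
      = L.foldl (fun b kp => if M kp.1 then min b kp.2 else b) b := by
  have h : (fun (b : Nat) (kp : List Char × Nat) => if kp.2 < b ∧ M kp.1 = true then kp.2 else b)
      = (fun b kp => if M kp.1 then min b kp.2 else b) := by
    funext b kp
    by_cases hm : M kp.1 = true
    · simp only [hm, and_true, if_true]
      split_ifs <;> omega
    · simp [hm]
  rw [h]

-- min-fold facts
theorem pv_fm_le_init {α : Type} (Q : α → Bool) (p : α → Nat) :
    ∀ (l : List α) (b : Nat), l.foldl (fun b x => if Q x then min b (p x) else b) b ≤ b := by
  intro l
  induction l with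
  | nil => intro b; simp
  | cons y l ih =>
    intro b
    simp only [List.foldl_cons]
    by_cases hq : Q y = true <;> simp [hq]
    · exact le_trans (ih _) (Nat.min_le_left _ _)
    · exact ih b

theorem pv_fm_le_matched {α : Type} (Q : α → Bool) (p : α → Nat) :
    ∀ (l : List α) (b : Nat) (x : α), x ∈ l → Q x = true →
      l.foldl (fun b x => if Q x then min b (p x) else b) b ≤ p x := by
  intro l
  induction l with
  | nil => intro b x hx; simp at hx
  | cons y l ih =>
    intro b x hx hq
    simp only [List.foldl_cons]
    rcases List.mem_cons.1 hx with rfl | hx'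
    · simp [hq]
      exact le_trans (pv_fm_le_init Q p l _) (Nat.min_le_right _ _)
    · by_cases hqy : Q y = true <;> simp [hqy] <;> exact ih _ _ hx' hq
theorem pv_fm_cases {α : Type} (Q : α → Bool) (p : α → Nat) :
    ∀ (l : List α) (b : Nat),
      l.foldl (fun b x => if Q x then min b (p x) else b) b = b ∨
        ∃ x ∈ l, Q x = true ∧ l.foldl (fun b x => if Q x then min b (p x) else b) b = p x := by
  intro l
  induction l with
  | nil => intro b; left; simp
  | cons y l ih =>
    intro b
    simp only [List.foldl_cons]
    by_cases hq : Q y = true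
    · rw [if_pos hq]
      rcases ih (min b (p y)) with h | ⟨x, hx, hqx, hr⟩
      · rcases Nat.le_total b (p y) with hle | hle
        · left; rw [h]; omega
        · right; exact ⟨y, List.mem_cons_self .., hq, by rw [h]; omega⟩
      · right; exact ⟨x, List.mem_cons_of_mem _ hx, hqx, hr⟩
    · rw [if_neg hq]
      rcases ih b with h | ⟨x, hx, hqx, hr⟩
      · left; exact h
      · right; exact ⟨x, List.mem_cons_of_mem _ hx, hqx, hr⟩

-- a keyword occurs at some scanned position iff it is a substring (nonempty keyword)
theorem pv_occurs_iff (s kw : List Char) (h : kw ≠ []) :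
    (∃ i ∈ List.range s.length, PySem.Chars.startswith (s.drop i) kw = true)
      ↔ PySem.Chars.isIn kw s = true := by
  rw [← PySem.Chars.exists_prefix_drop_iff_isIn]
  constructor
  · rintro ⟨i, _, hs⟩
    exact ⟨i, (PySem.Chars.startswith_iff _ _).1 hs⟩
  · rintro ⟨j, hj⟩
    by_cases hl : j < s.length
    · exact ⟨j, List.mem_range.2 hl, (PySem.Chars.startswith_iff _ _).2 hj⟩
    · exfalso
      rw [List.drop_eq_nil_of_le (by omega)] at hj
      exact h (List.prefix_nil.1 hj)

theorem pv_isIn_of_startswith (s kw : List Char) (i : Nat)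
    (h : PySem.Chars.startswith (s.drop i) kw = true) : PySem.Chars.isIn kw s = true :=
  (PySem.Chars.exists_prefix_drop_iff_isIn kw s).1 ⟨i, (PySem.Chars.startswith_iff _ _).1 h⟩

-- the nested position/keyword fold is a fold over the flattened pair list
theorem pv_flatten (s : List Char) :
    ∀ (idxs : List Nat) (c : Nat),
      idxs.foldl (fun c i => pvKeywords.foldl
          (fun b kp => if PySem.Chars.startswith (s.drop i) kp.1 then min b kp.2 else b) c) c
        = (idxs.flatMap (fun i => pvKeywords.map (fun kp => (i, kp)))).foldl
            (fun b x => if PySem.Chars.startswith (s.drop x.1) x.2.1 then min b x.2.2 else b) c := by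
  intro idxs
  induction idxs with
  | nil => intro c; simp
  | cons i idxs ih =>
    intro c
    simp only [List.foldl_cons, List.flatMap_cons, List.foldl_append, List.foldl_map]
    rw [ih]

-- ===== VERDICT (by name: the statement is the Claim_ definition above) =====
theorem classify_argument_type_py_spec : Claim_equal_classify_argument_type_py := by
  intro sentence _
  unfold Spec_classify_argument_type_py classify_argument_type_py classify_argument_type_py_alt
  simp only [List.any_cons, List.any_nil, Bool.or_false, PySem.Str.isIn_eq, PySem.Str.toList_lower]
  set s := PySem.Chars.lower sentence.toList with hs
  have hfun : (fun (best : Nat) (i : Nat) => pvKeywords.foldl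
        (fun b kp => if kp.2 < b ∧ PySem.Chars.startswith (s.drop i) kp.1 = true then kp.2 else b) best)
      = (fun best i => pvKeywords.foldl
        (fun b kp => if PySem.Chars.startswith (s.drop i) kp.1 then min b kp.2 else b) best) := by
    funext best i
    exact pv_guard_min _ _ _
  rw [hfun, pv_flatten s]
  set flat := (List.range s.length).flatMap (fun i => pvKeywords.map (fun kp => (i, kp))) with hflat
  set best := flat.foldl
      (fun b x => if PySem.Chars.startswith (s.drop x.1) x.2.1 then min b x.2.2 else b) 4 with hbest
  have hmemflat : ∀ (i : Nat) (kp : List Char × Nat), kp ∈ pvKeywords → i < s.length → (i, kp) ∈ flat := by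
    intro i kp hkp hi
    exact List.mem_flatMap.2 ⟨i, List.mem_range.2 hi, List.mem_map.2 ⟨kp, hkp, rfl⟩⟩
  have hbest_le : ∀ kw pr, (kw, pr) ∈ pvKeywords → PySem.Chars.isIn kw s = true → kw ≠ [] → best ≤ pr := by
    intro kw pr hm hin hne
    obtain ⟨i, hi, hsw⟩ := (pv_occurs_iff s kw hne).2 hin
    exact pv_fm_le_matched (fun x => PySem.Chars.startswith (s.drop x.1) x.2.1) (fun x => x.2.2)
      flat 4 (i, (kw, pr)) (hmemflat i (kw, pr) hm (List.mem_range.1 hi)) hsw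
  have hkey : best = 4 ∨ ∃ kw pr, (kw, pr) ∈ pvKeywords ∧ PySem.Chars.isIn kw s = true ∧ best = pr := by
    rcases pv_fm_cases (fun x => PySem.Chars.startswith (s.drop x.1) x.2.1) (fun x => x.2.2)
        flat 4 with h | ⟨x, hx, hq, hr⟩
    · exact Or.inl h
    · refine Or.inr ⟨x.2.1, x.2.2, ?_, pv_isIn_of_startswith s x.2.1 x.1 hq, hr⟩
      obtain ⟨i, _, hmap⟩ := List.mem_flatMap.1 hx
      obtain ⟨kp, hkp, hpe⟩ := List.mem_map.1 hmap
      have : x.2 = kp := by rw [← hpe]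
      rw [this]
      exact hkp
  by_cases h0 : (PySem.Chars.isIn "precedent".toList s ||
      (PySem.Chars.isIn "prior case".toList s || PySem.Chars.isIn "established law".toList s)) = true
  · have hb : best = 0 := by
      have hle : best ≤ 0 := by
        rcases (by simpa using h0 : PySem.Chars.isIn "precedent".toList s = true ∨
            PySem.Chars.isIn "prior case".toList s = true ∨
            PySem.Chars.isIn "established law".toList s = true) with h | h | h
        · exact hbest_le _ 0 (by simp [pvKeywords]) h (by decide)
        · exact hbest_le _ 0 (by simp [pvKeywords]) h (by decide)
        · exact hbest_le _ 0 (by simp [pvKeywords]) h (by decide)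
      omega
    rw [if_pos h0, hb]; rfl
  · by_cases h1 : (PySem.Chars.isIn "statute".toList s ||
        (PySem.Chars.isIn "statutory".toList s || PySem.Chars.isIn "legislative".toList s)) = true
    · have hb : best = 1 := by
        have hle : best ≤ 1 := by
          rcases (by simpa using h1 : PySem.Chars.isIn "statute".toList s = true ∨
              PySem.Chars.isIn "statutory".toList s = true ∨
              PySem.Chars.isIn "legislative".toList s = true) with h | h | h
          · exact hbest_le _ 1 (by simp [pvKeywords]) h (by decide)
          · exact hbest_le _ 1 (by simp [pvKeywords]) h (by decide)
          · exact hbest_le _ 1 (by simp [pvKeywords]) h (by decide)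
        rcases hkey with h4 | ⟨kw, pr, hm, hin, hpr⟩
        · omega
        · simp only [pvKeywords, List.mem_cons, List.not_mem_nil, or_false, Prod.mk.injEq] at hm
          rcases hm with ⟨rfl, rfl⟩ | ⟨rfl, rfl⟩ | ⟨rfl, rfl⟩ | ⟨rfl, rfl⟩ | ⟨rfl, rfl⟩ |
            ⟨rfl, rfl⟩ | ⟨rfl, rfl⟩ | ⟨rfl, rfl⟩ | ⟨rfl, rfl⟩ | ⟨rfl, rfl⟩ | ⟨rfl, rfl⟩ | ⟨rfl, rfl⟩ <;>
            first
              | omega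
              | (exfalso; apply h0; rw [hin]; simp)
      rw [if_neg h0, if_pos h1, hb]; rfl
    · by_cases h2 : (PySem.Chars.isIn "constitutional".toList s ||
          (PySem.Chars.isIn "amendment".toList s || PySem.Chars.isIn "rights".toList s)) = true
      · have hb : best = 2 := by
          have hle : best ≤ 2 := by
            rcases (by simpa using h2 : PySem.Chars.isIn "constitutional".toList s = true ∨
                PySem.Chars.isIn "amendment".toList s = true ∨
                PySem.Chars.isIn "rights".toList s = true) with h | h | h
            · exact hbest_le _ 2 (by simp [pvKeywords]) h (by decide)
            · exact hbest_le _ 2 (by simp [pvKeywords]) h (by decide)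
            · exact hbest_le _ 2 (by simp [pvKeywords]) h (by decide)
          rcases hkey with h4 | ⟨kw, pr, hm, hin, hpr⟩
          · omega
          · simp only [pvKeywords, List.mem_cons, List.not_mem_nil, or_false, Prod.mk.injEq] at hm
            rcases hm with ⟨rfl, rfl⟩ | ⟨rfl, rfl⟩ | ⟨rfl, rfl⟩ | ⟨rfl, rfl⟩ | ⟨rfl, rfl⟩ |
              ⟨rfl, rfl⟩ | ⟨rfl, rfl⟩ | ⟨rfl, rfl⟩ | ⟨rfl, rfl⟩ | ⟨rfl, rfl⟩ | ⟨rfl, rfl⟩ | ⟨rfl, rfl⟩ <;>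
              first
                | omega
                | (exfalso; apply h0; rw [hin]; simp) | (exfalso; apply h1; rw [hin]; simp)
        rw [if_neg h0, if_neg h1, if_pos h2, hb]; rfl
      · by_cases h3 : (PySem.Chars.isIn "policy".toList s ||
            (PySem.Chars.isIn "public interest".toList s || PySem.Chars.isIn "social".toList s)) = true
        · have hb : best = 3 := by
            have hle : best ≤ 3 := by
              rcases (by simpa using h3 : PySem.Chars.isIn "policy".toList s = true ∨
                  PySem.Chars.isIn "public interest".toList s = true ∨
                  PySem.Chars.isIn "social".toList s = true) with h | h | h
              · exact hbest_le _ 3 (by simp [pvKeywords]) h (by decide)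
              · exact hbest_le _ 3 (by simp [pvKeywords]) h (by decide)
              · exact hbest_le _ 3 (by simp [pvKeywords]) h (by decide)
            rcases hkey with h4 | ⟨kw, pr, hm, hin, hpr⟩
            · omega
            · simp only [pvKeywords, List.mem_cons, List.not_mem_nil, or_false, Prod.mk.injEq] at hm
              rcases hm with ⟨rfl, rfl⟩ | ⟨rfl, rfl⟩ | ⟨rfl, rfl⟩ | ⟨rfl, rfl⟩ | ⟨rfl, rfl⟩ |
                ⟨rfl, rfl⟩ | ⟨rfl, rfl⟩ | ⟨rfl, rfl⟩ | ⟨rfl, rfl⟩ | ⟨rfl, rfl⟩ | ⟨rfl, rfl⟩ | ⟨rfl, rfl⟩ <;>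
                first
                  | omega
                  | (exfalso; apply h0; rw [hin]; simp) | (exfalso; apply h1; rw [hin]; simp) | (exfalso; apply h2; rw [hin]; simp)
          rw [if_neg h0, if_neg h1, if_neg h2, if_pos h3, hb]; rfl
        · have hb : best = 4 := by
            rcases hkey with h4 | ⟨kw, pr, hm, hin, hpr⟩
            · exact h4
            · simp only [pvKeywords, List.mem_cons, List.not_mem_nil, or_false, Prod.mk.injEq] at hm
              rcases hm with ⟨rfl, rfl⟩ | ⟨rfl, rfl⟩ | ⟨rfl, rfl⟩ | ⟨rfl, rfl⟩ | ⟨rfl, rfl⟩ |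
                ⟨rfl, rfl⟩ | ⟨rfl, rfl⟩ | ⟨rfl, rfl⟩ | ⟨rfl, rfl⟩ | ⟨rfl, rfl⟩ | ⟨rfl, rfl⟩ | ⟨rfl, rfl⟩ <;>
                (first
                  | (exfalso; apply h0; rw [hin]; simp)
                  | (exfalso; apply h1; rw [hin]; simp)
                  | (exfalso; apply h2; rw [hin]; simp)
                  | (exfalso; apply h3; rw [hin]; simp))
          rw [if_neg h0, if_neg h1, if_neg h2, if_neg h3, hb]; rfl
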